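-- pv_equiv track=rewrite | github.com/Joefear/dgce-engine | packages/dgce_contracts/alignment_builder.py | _build_drift_items
-- ===== SOURCE A (Python) =====
-- from collections.abc import Mapping, Sequence
-- from typing import Any
--
-- def _build_drift_items(
--     approved_targets: Mapping[str, dict[str, Any]],
--     preview_targets: Mapping[str, dict[str, Any]],
--     observed_targets: Mapping[str, dict[str, Any]],
--     available_targets: Mapping[str, dict[str, Any]],
-- ) -> list[dict[str, str]]:
--     drift_items: list[dict[str, str]] = []
--     approved_names = set(approved_targets)
--     available_names = set(available_targets)
--     preview_names = set(preview_targets)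
--     observed_names = set(observed_targets)
--     for target in sorted(approved_names - available_names):
--         drift_items.append(
--             _drift_item(
--                 code="missing_expected_artifact",
--                 summary="Approved expected artifact is missing from preview and observed targets.",
--                 target=target,
--                 severity="blocking",
--             )
--         )
--     for target in sorted((preview_names | observed_names) - approved_names):
--         drift_items.append(
--             _drift_item(
--                 code="unexpected_artifact",
--                 summary="Preview or observed target is outside approved expectations.",
--                 target=target,
--                 severity="blocking",
--             )
--         )
--     for target in sorted(approved_names & available_names):
--         approved_structure = approved_targets[target]["structure"]
--         if not approved_structure:
--             continue
--         candidate_structure = available_targets[target]["structure"]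
--         if candidate_structure and candidate_structure != approved_structure:
--             drift_items.append(
--                 _drift_item(
--                     code="structure_mismatch",
--                     summary="Comparable structured metadata differs from approved expectations.",
--                     target=target,
--                     severity="informational",
--                 )
--             )
--     return _sort_drift_items(drift_items)
--
-- def _drift_item(*, code: str, summary: str, target: str, severity: str) -> dict[str, str]:
--     return {
--         "code": code,
--         "summary": summary,
--         "target": target,
--         "severity": severity,
--     }
--
-- def _sort_drift_items(drift_items: Sequence[Mapping[str, str]]) -> list[dict[str, str]]:
--     return sorted(
--         [dict(item) for item in drift_items],
--         key=lambda item: (item["severity"] != "blocking", item["code"], item["target"]),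
--     )
-- ===== SOURCE B (Python) =====
-- # One classification pass over the union of all target names instead of three
-- # separate set-difference/intersection passes; the final _sort_drift_items is shared.
--
-- def _drift_item(*, code: str, summary: str, target: str, severity: str) -> dict:
--     return {
--         "code": code,
--         "summary": summary,
--         "target": target,
--         "severity": severity,
--     }
--
--
-- def _sort_drift_items(drift_items):
--     return sorted(
--         [dict(item) for item in drift_items],
--         key=lambda item: (item["severity"] != "blocking", item["code"], item["target"]),
--     )
--
--
-- def _build_drift_items(approved_targets, preview_targets, observed_targets, available_targets):
--     all_names = set(approved_targets) | set(available_targets) | set(preview_targets) | set(observed_targets)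
--     drift_items = []
--     for name in sorted(all_names):
--         in_approved = name in approved_targets
--         if in_approved and name not in available_targets:
--             drift_items.append(
--                 _drift_item(
--                     code="missing_expected_artifact",
--                     summary="Approved expected artifact is missing from preview and observed targets.",
--                     target=name,
--                     severity="blocking",
--                 )
--             )
--         elif (not in_approved) and (name in preview_targets or name in observed_targets):
--             drift_items.append(
--                 _drift_item(
--                     code="unexpected_artifact",
--                     summary="Preview or observed target is outside approved expectations.",
--                     target=name,
--                     severity="blocking",
--                 )
--             )
--         elif in_approved:
--             approved_structure = approved_targets[name]["structure"]
--             if approved_structure: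
--                 candidate_structure = available_targets[name]["structure"]
--                 if candidate_structure and candidate_structure != approved_structure:
--                     drift_items.append(
--                         _drift_item(
--                             code="structure_mismatch",
--                             summary="Comparable structured metadata differs from approved expectations.",
--                             target=name,
--                             severity="informational",
--                         )
--                     )
--     return _sort_drift_items(drift_items)
-- ===== Notes on version B (the rewrite author's own statement) =====
-- stated objective: simpler
-- what changed: A makes three separate passes over sorted set-differences/intersections (approved-available, (preview|observed)-approved, approved&available); B builds the union of all target names once and classifies each name in a single pass, appending at most one drift item per name, then applies the same final sort.
import Mathlib
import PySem

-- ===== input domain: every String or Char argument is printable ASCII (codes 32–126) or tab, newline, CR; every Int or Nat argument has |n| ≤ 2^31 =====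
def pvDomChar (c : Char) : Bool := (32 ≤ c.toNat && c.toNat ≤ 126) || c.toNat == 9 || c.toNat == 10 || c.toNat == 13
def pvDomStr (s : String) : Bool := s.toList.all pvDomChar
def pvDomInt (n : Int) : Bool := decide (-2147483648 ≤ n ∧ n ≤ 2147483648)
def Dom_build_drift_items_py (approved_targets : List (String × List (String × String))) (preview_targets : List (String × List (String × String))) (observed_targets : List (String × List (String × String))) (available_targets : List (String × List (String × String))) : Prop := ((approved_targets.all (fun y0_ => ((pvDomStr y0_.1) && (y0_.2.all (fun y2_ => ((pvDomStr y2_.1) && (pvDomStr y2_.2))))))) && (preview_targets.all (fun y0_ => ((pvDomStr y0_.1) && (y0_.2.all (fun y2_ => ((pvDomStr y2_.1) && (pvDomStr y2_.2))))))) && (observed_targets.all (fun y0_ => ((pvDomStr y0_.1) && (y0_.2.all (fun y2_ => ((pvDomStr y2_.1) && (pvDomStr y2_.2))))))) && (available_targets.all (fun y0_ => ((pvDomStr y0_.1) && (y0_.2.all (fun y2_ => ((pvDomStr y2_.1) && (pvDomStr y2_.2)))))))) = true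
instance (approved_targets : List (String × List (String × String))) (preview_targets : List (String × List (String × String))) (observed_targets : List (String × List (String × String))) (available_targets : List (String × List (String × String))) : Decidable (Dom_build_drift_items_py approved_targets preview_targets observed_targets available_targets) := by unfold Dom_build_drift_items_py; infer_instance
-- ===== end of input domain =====

-- B replaces A's three filtered set-difference/intersection passes by ONE classification pass
-- over the sorted union of all target names (objective: simpler; return value only, no mutation).

-- ===== PORT A =====
-- shared same-module helpers (_drift_item, _sort_drift_items), used verbatim by both Pythons
def pvDriftItem (code summary target severity : String) : List (String × String) :=
  [("code", code), ("summary", summary), ("target", target), ("severity", severity)]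

-- item[k]; every drift item carries all four keys, so the default is never reached
def pvItemGet (item : List (String × String)) (k : String) : String :=
  (PySem.Dict.mk item).getD k ""

-- Python's tuple sort key (severity != "blocking", code, target) ported as a List String
-- lexicographic key with the bool as "0"/"1": exact here, since '<' on List/String in Lean is
-- the same lexicographic order as Python's on tuples/str and False < True matches "0" < "1".
def pvItemKey (item : List (String × String)) : List String :=
  [(if pvItemGet item "severity" ≠ "blocking" then "1" else "0"),
   pvItemGet item "code", pvItemGet item "target"]

def pvSortDriftItems (items : List (List (String × String))) : List (List (String × String)) :=
  PySem.List.sorted items pvItemKey false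

-- d[t]["structure"] read with default "" where Python raises KeyError (excluded by Pre_)
def pvStructOf (d : PySem.Dict String (List (String × String))) (t : String) : String :=
  (PySem.Dict.ofList (d.getD t [])).getD "structure" ""

def pvMissingItem (t : String) : List (String × String) :=
  pvDriftItem "missing_expected_artifact"
    "Approved expected artifact is missing from preview and observed targets." t "blocking"

def pvUnexpectedItem (t : String) : List (String × String) :=
  pvDriftItem "unexpected_artifact"
    "Preview or observed target is outside approved expectations." t "blocking"

def pvMismatchItem (t : String) : List (String × String) :=
  pvDriftItem "structure_mismatch"
    "Comparable structured metadata differs from approved expectations." t "informational"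

def build_drift_items_py (approved_targets : List (String × List (String × String))) (preview_targets : List (String × List (String × String))) (observed_targets : List (String × List (String × String))) (available_targets : List (String × List (String × String))) : List (List (String × String)) :=
  let apD := PySem.Dict.ofList approved_targets
  let pvD := PySem.Dict.ofList preview_targets
  let obD := PySem.Dict.ofList observed_targets
  let avD := PySem.Dict.ofList available_targets
  let approved_names : PySem.Set String := PySem.Set.ofList apD.keys
  let available_names : PySem.Set String := PySem.Set.ofList avD.keys
  let preview_names : PySem.Set String := PySem.Set.ofList pvD.keys
  let observed_names : PySem.Set String := PySem.Set.ofList obD.keys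
  let items1 :=
    (PySem.List.sorted (PySem.Set.diff approved_names available_names) (fun x => x) false).foldl
      (fun acc t => acc ++ [pvMissingItem t]) []
  let items2 :=
    (PySem.List.sorted (PySem.Set.diff (PySem.Set.union preview_names observed_names) approved_names) (fun x => x) false).foldl
      (fun acc t => acc ++ [pvUnexpectedItem t]) items1
  let items3 :=
    (PySem.List.sorted (PySem.Set.inter approved_names available_names) (fun x => x) false).foldl
      (fun acc t =>
        let approved_structure := pvStructOf apD t
        if approved_structure = "" then acc
        else
          let candidate_structure := pvStructOf avD t
          if candidate_structure ≠ "" ∧ candidate_structure ≠ approved_structure then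
            acc ++ [pvMismatchItem t]
          else acc)
      items2
  pvSortDriftItems items3

-- ===== PORT B =====
def build_drift_items_py_alt (approved_targets : List (String × List (String × String))) (preview_targets : List (String × List (String × String))) (observed_targets : List (String × List (String × String))) (available_targets : List (String × List (String × String))) : List (List (String × String)) :=
  let apD := PySem.Dict.ofList approved_targets
  let pvD := PySem.Dict.ofList preview_targets
  let obD := PySem.Dict.ofList observed_targets
  let avD := PySem.Dict.ofList available_targets
  let all_names : PySem.Set String :=
    PySem.Set.union (PySem.Set.union (PySem.Set.union (PySem.Set.ofList apD.keys) avD.keys) pvD.keys) obD.keys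
  let drift_items :=
    (PySem.List.sorted all_names (fun x => x) false).foldl
      (fun acc name =>
        let in_approved := apD.contains name
        if in_approved && !avD.contains name then
          acc ++ [pvMissingItem name]
        else if !in_approved && (pvD.contains name || obD.contains name) then
          acc ++ [pvUnexpectedItem name]
        else if in_approved then
          let approved_structure := pvStructOf apD name
          if approved_structure ≠ "" then
            let candidate_structure := pvStructOf avD name
            if candidate_structure ≠ "" ∧ candidate_structure ≠ approved_structure then
              acc ++ [pvMismatchItem name]
            else acc
          else acc
        else acc)
      []
  pvSortDriftItems drift_items

-- ===== PRECONDITION & SPEC =====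
-- Pre_ excludes exactly the inputs where Python A raises KeyError: some name approved AND
-- available whose approved entry has no "structure" key, or whose approved structure is truthy
-- while its available entry has no "structure" key.
def Pre_build_drift_items_py (approved_targets : List (String × List (String × String))) (preview_targets : List (String × List (String × String))) (observed_targets : List (String × List (String × String))) (available_targets : List (String × List (String × String))) : Prop :=
  ∀ t ∈ (PySem.Dict.ofList approved_targets).keys,
    (PySem.Dict.ofList available_targets).contains t = true →
      ((PySem.Dict.ofList ((PySem.Dict.ofList approved_targets).getD t [])).contains "structure" = true ∧
        (pvStructOf (PySem.Dict.ofList approved_targets) t ≠ "" →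
          (PySem.Dict.ofList ((PySem.Dict.ofList available_targets).getD t [])).contains "structure" = true))
instance (approved_targets : List (String × List (String × String))) (preview_targets : List (String × List (String × String))) (observed_targets : List (String × List (String × String))) (available_targets : List (String × List (String × String))) : Decidable (Pre_build_drift_items_py approved_targets preview_targets observed_targets available_targets) := by unfold Pre_build_drift_items_py; infer_instance

def pvWitness_build_drift_items_py : (List (String × List (String × String))) × (List (String × List (String × String))) × (List (String × List (String × String))) × (List (String × List (String × String))) :=
  ([("a", [("structure", "x")]), ("b", [("structure", "")])],
   [("c", [])], [("a", [("structure", "x")])],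
   [("a", [("structure", "y")]), ("d", [("structure", "z")])])

def Spec_build_drift_items_py (approved_targets : List (String × List (String × String))) (preview_targets : List (String × List (String × String))) (observed_targets : List (String × List (String × String))) (available_targets : List (String × List (String × String))) (out : List (List (String × String))) : Prop := out = build_drift_items_py_alt approved_targets preview_targets observed_targets available_targets
instance (approved_targets : List (String × List (String × String))) (preview_targets : List (String × List (String × String))) (observed_targets : List (String × List (String × String))) (available_targets : List (String × List (String × String))) (out : List (List (String × String))) : Decidable (Spec_build_drift_items_py approved_targets preview_targets observed_targets available_targets out) := by unfold Spec_build_drift_items_py; infer_instance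

-- ===== CLAIM (what is proved, stated in full; the proofs are below) =====
def Claim_equal_build_drift_items_py : Prop := ∀ (approved_targets : List (String × List (String × String))) (preview_targets : List (String × List (String × String))) (observed_targets : List (String × List (String × String))) (available_targets : List (String × List (String × String))), Dom_build_drift_items_py approved_targets preview_targets observed_targets available_targets → Pre_build_drift_items_py approved_targets preview_targets observed_targets available_targets → Spec_build_drift_items_py approved_targets preview_targets observed_targets available_targets (build_drift_items_py approved_targets preview_targets observed_targets available_targets)

-- ===== LEMMAS AND PROOFS =====

-- B's per-name classification, as a 0-or-1-element list
def pvH (apD pvD obD avD : PySem.Dict String (List (String × String))) (name : String) : List (List (String × String)) :=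
  if apD.contains name && !avD.contains name then [pvMissingItem name]
  else if !apD.contains name && (pvD.contains name || obD.contains name) then [pvUnexpectedItem name]
  else if apD.contains name then
    (if pvStructOf apD name ≠ "" then
      (if pvStructOf avD name ≠ "" ∧ pvStructOf avD name ≠ pvStructOf apD name then [pvMismatchItem name] else [])
     else [])
  else []

theorem pvB_foldl_eq (apD pvD obD avD : PySem.Dict String (List (String × String)))
    (l : List String) (init : List (List (String × String))) :
    l.foldl
      (fun acc name =>
        if apD.contains name && !avD.contains name then
          acc ++ [pvMissingItem name]
        else if !apD.contains name && (pvD.contains name || obD.contains name) then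
          acc ++ [pvUnexpectedItem name]
        else if apD.contains name then
          if pvStructOf apD name ≠ "" then
            if pvStructOf avD name ≠ "" ∧ pvStructOf avD name ≠ pvStructOf apD name then
              acc ++ [pvMismatchItem name]
            else acc
          else acc
        else acc)
      init = init ++ l.flatMap (pvH apD pvD obD avD) := by
  induction l generalizing init with
  | nil => simp
  | cons x xs ih =>
      rw [List.foldl_cons, ih, List.flatMap_cons, ← List.append_assoc]
      congr 1
      simp only [pvH]
      split_ifs <;> simp_all

-- A's mismatch loop, as a flatMap
def pvGA (apD avD : PySem.Dict String (List (String × String))) (t : String) : List (List (String × String)) :=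
  if pvStructOf apD t = "" then []
  else if pvStructOf avD t ≠ "" ∧ pvStructOf avD t ≠ pvStructOf apD t then [pvMismatchItem t] else []

theorem pvA_mismatch_foldl_eq (apD avD : PySem.Dict String (List (String × String)))
    (l : List String) (init : List (List (String × String))) :
    l.foldl
      (fun acc t =>
        if pvStructOf apD t = "" then acc
        else
          if pvStructOf avD t ≠ "" ∧ pvStructOf avD t ≠ pvStructOf apD t then
            acc ++ [pvMismatchItem t]
          else acc)
      init = init ++ l.flatMap (pvGA apD avD) := by
  induction l generalizing init with
  | nil => simp
  | cons x xs ih =>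
      rw [List.foldl_cons, ih, List.flatMap_cons, ← List.append_assoc]
      congr 1
      simp only [pvGA]
      split_ifs <;> simp_all

theorem pairwise_lt_of_pairwise_le_nodup {κ : Type} [LinearOrder κ] {α : Type} (key : α → κ)
    {l : List α} (h1 : l.Pairwise (fun a b => key a ≤ key b)) (h2 : (l.map key).Nodup) :
    l.Pairwise (fun a b => key a < key b) := by
  have hne : l.Pairwise (fun a b => key a ≠ key b) := by
    simpa [List.Nodup, List.pairwise_map] using h2
  exact (h1.and hne).imp (fun h => lt_of_le_of_ne h.1 h.2)

theorem sorted_id_pairwise_lt {l : List String} (h : l.Nodup) :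
    (PySem.List.sorted l (fun x => x) false).Pairwise (fun a b => a < b) := by
  apply pairwise_lt_of_pairwise_le_nodup (fun x => x)
  · exact PySem.List.sorted_pairwise l (fun x => x)
  · simpa using ((PySem.List.sorted_perm l (fun x => x) false).nodup_iff).mpr h

-- a sorted sub-set of names equals the corresponding filter of the sorted union
theorem sorted_sub_eq_filter {sub all : List String} (p : String → Bool)
    (hsub : sub.Nodup) (hall : all.Nodup)
    (hmem : ∀ t, t ∈ sub ↔ (t ∈ all ∧ p t = true)) :
    PySem.List.sorted sub (fun x => x) false =
      (PySem.List.sorted all (fun x => x) false).filter p := by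
  apply PySem.List.sorted_eq_of_perm_of_pairwise_lt
  · rw [List.perm_ext_iff_of_nodup ((List.Nodup.filter p) (((PySem.List.sorted_perm all (fun x => x) false).nodup_iff).mpr hall)) hsub]
    intro t
    simp [List.mem_filter, PySem.List.mem_sorted, hmem t]
  · exact List.Pairwise.filter p (sorted_id_pairwise_lt hall)

theorem flatMap_partition3 {α β : Type} [DecidableEq β] (p1 p2 p3 : α → Bool) (h : α → List β) (l : List α)
    (h12 : ∀ x, p1 x = true → p2 x = false) (h13 : ∀ x, p1 x = true → p3 x = false)
    (h23 : ∀ x, p2 x = true → p3 x = false)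
    (h0 : ∀ x, p1 x = false → p2 x = false → p3 x = false → h x = []) :
    (l.flatMap h).Perm
      ((l.filter p1).flatMap h ++ (l.filter p2).flatMap h ++ (l.filter p3).flatMap h) := by
  induction l with
  | nil => simp
  | cons x xs ih =>
      simp only [List.flatMap_cons, List.filter_cons]
      by_cases hp1 : p1 x = true
      · simp only [hp1, h12 x hp1, h13 x hp1, Bool.false_eq_true, if_true, if_false,
          List.flatMap_cons]
        simp only [List.perm_iff_count, List.count_append] at ih ⊢
        intro b; have := ih b; omega
      · have hp1' : p1 x = false := by simpa using hp1
        by_cases hp2 : p2 x = true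
        · simp only [hp1', hp2, h23 x hp2, Bool.false_eq_true, if_false, if_true,
            List.flatMap_cons]
          simp only [List.perm_iff_count, List.count_append] at ih ⊢
          intro b; have := ih b; omega
        · have hp2' : p2 x = false := by simpa using hp2
          by_cases hp3 : p3 x = true
          · simp only [hp1', hp2', hp3, Bool.false_eq_true, if_false, if_true,
              List.flatMap_cons]
            simp only [List.perm_iff_count, List.count_append] at ih ⊢
            intro b; have := ih b; omega
          · have hp3' : p3 x = false := by simpa using hp3
            simp only [hp1', hp2', hp3', Bool.false_eq_true, if_false,
              h0 x hp1' hp2' hp3', List.nil_append]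
            exact ih

theorem flatMap_eq_map_of {α β : Type} (l : List α) (h : α → List β) (f : α → β)
    (hx : ∀ x ∈ l, h x = [f x]) : l.flatMap h = l.map f := by
  induction l with
  | nil => simp
  | cons x xs ih =>
      simp [List.flatMap_cons, hx x (by simp), ih (fun y hy => hx y (by simp [hy]))]

theorem flatMap_congr_mem {α β : Type} (l : List α) (h g : α → List β)
    (hx : ∀ x ∈ l, h x = g x) : l.flatMap h = l.flatMap g := by
  induction l with
  | nil => simp
  | cons x xs ih =>
      simp [List.flatMap_cons, hx x (by simp), ih (fun y hy => hx y (by simp [hy]))]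

theorem nodup_map_flatMap {α β : Type} (l : List α) (h : α → List β) (f : β → α)
    (hl : l.Nodup) (htgt : ∀ x, ∀ it ∈ h x, f it = x) (hlen : ∀ x, (h x).length ≤ 1) :
    ((l.flatMap h).map f).Nodup := by
  induction l with
  | nil => simp
  | cons x xs ih =>
      rw [List.flatMap_cons, List.map_append, List.nodup_append]
      refine ⟨?_, ih (by simp_all), ?_⟩
      · cases hh : h x with
        | nil => simp
        | cons b t =>
            have := hlen x
            rw [hh] at this
            cases t with
            | cons c u => simp at this
            | nil => simp
      · intro y hy z hz
        simp only [List.mem_map] at hy hz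
        obtain ⟨it, hit, rfl⟩ := hy
        obtain ⟨it', hit', rfl⟩ := hz
        simp only [List.mem_flatMap] at hit'
        obtain ⟨x', hx', hit'2⟩ := hit'
        rw [htgt x it hit, htgt x' it' hit'2]
        intro hcontra
        subst hcontra
        exact (List.nodup_cons.mp hl).1 hx'

theorem pvItemGet_driftItem_target (c s t sev : String) :
    pvItemGet (pvDriftItem c s t sev) "target" = t := by
  simp [pvItemGet, pvDriftItem, PySem.Dict.getD, PySem.Dict.get?]

theorem pvItemKey_eq_imp_target_eq (a b : List (String × String))
    (h : pvItemKey a = pvItemKey b) : pvItemGet a "target" = pvItemGet b "target" := by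
  simp only [pvItemKey, List.cons.injEq] at h
  exact h.2.2.1

theorem sorted_eq_of_perm_of_key_nodup {α : Type} (key : α → List String) (xs ys : List α)
    (hp : xs.Perm ys) (hn : (ys.map key).Nodup) :
    PySem.List.sorted xs key false = PySem.List.sorted ys key false := by
  rw [show (fun (a b : List String) => a.decidableLT b) = (LinearOrder.toDecidableLT : DecidableLT (List String)) from funext fun a => funext fun b => Subsingleton.elim _ _]
  apply PySem.List.sorted_eq_of_perm_of_pairwise_lt
  · exact (@PySem.List.sorted_perm α (List String) List.instLT LinearOrder.toDecidableLT ys key false).trans hp.symm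
  · apply pairwise_lt_of_pairwise_le_nodup key
    · exact PySem.List.sorted_pairwise ys key
    · exact ((@PySem.List.sorted_perm α (List String) List.instLT LinearOrder.toDecidableLT ys key false).map key).nodup_iff.mpr hn

theorem nodup_key_of_nodup_tgt (l : List (List (String × String)))
    (h : (l.map (fun it => pvItemGet it "target")).Nodup) : (l.map pvItemKey).Nodup := by
  simp only [List.Nodup, List.pairwise_map] at h ⊢
  exact h.imp (fun hne hk => hne (pvItemKey_eq_imp_target_eq _ _ hk))

theorem pvAB_eq (approved_targets preview_targets observed_targets available_targets : List (String × List (String × String))) :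
    build_drift_items_py approved_targets preview_targets observed_targets available_targets =
    build_drift_items_py_alt approved_targets preview_targets observed_targets available_targets := by
  simp only [build_drift_items_py, build_drift_items_py_alt]
  rw [PySem.List.foldl_append_singleton_eq_map, PySem.List.foldl_append_singleton_eq_map,
      pvA_mismatch_foldl_eq, pvB_foldl_eq]
  rw [List.nil_append, List.nil_append]
  set apD := PySem.Dict.ofList approved_targets with hapD
  set pvD := PySem.Dict.ofList preview_targets with hpvD
  set obD := PySem.Dict.ofList observed_targets with hobD
  set avD := PySem.Dict.ofList available_targets with havD
  have hallnodup : ((((PySem.Set.ofList apD.keys).union avD.keys).union pvD.keys).union obD.keys).Nodup :=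
    PySem.Set.nodup_union _ _ (PySem.Set.nodup_union _ _ (PySem.Set.nodup_union _ _ (PySem.Set.nodup_ofList _)))
  set U := (((PySem.Set.ofList apD.keys).union avD.keys).union pvD.keys).union obD.keys with hU
  set S := PySem.List.sorted U (fun x => x) false with hS
  have hSnodup : S.Nodup := ((PySem.List.sorted_perm U (fun x => x) false).nodup_iff).mpr hallnodup
  have hmemU : ∀ t : String, t ∈ U ↔ (t ∈ apD.keys ∨ t ∈ avD.keys ∨ t ∈ pvD.keys ∨ t ∈ obD.keys) := by
    intro t
    simp [hU, PySem.Set.mem_union, PySem.Set.mem_ofList, or_assoc]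
  have h1 : PySem.List.sorted ((PySem.Set.ofList apD.keys).diff (PySem.Set.ofList avD.keys)) (fun x => x) false
      = S.filter (fun t => apD.contains t && !avD.contains t) := by
    apply sorted_sub_eq_filter _ (PySem.Set.nodup_diff _ _ (PySem.Set.nodup_ofList _)) hallnodup
    intro t
    rw [hmemU t]
    simp only [PySem.Set.mem_diff, PySem.Set.mem_ofList, PySem.Dict.contains_eq_decide_mem_keys,
      Bool.and_eq_true, Bool.not_eq_eq_eq_not, Bool.not_true, decide_eq_true_eq, decide_eq_false_iff_not]
    tauto
  have h2 : PySem.List.sorted (((PySem.Set.ofList pvD.keys).union (PySem.Set.ofList obD.keys)).diff (PySem.Set.ofList apD.keys)) (fun x => x) false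
      = S.filter (fun t => !apD.contains t && (pvD.contains t || obD.contains t)) := by
    apply sorted_sub_eq_filter _ (PySem.Set.nodup_diff _ _ (PySem.Set.nodup_union _ _ (PySem.Set.nodup_ofList _))) hallnodup
    intro t
    rw [hmemU t]
    simp only [PySem.Set.mem_diff, PySem.Set.mem_union, PySem.Set.mem_ofList,
      PySem.Dict.contains_eq_decide_mem_keys, Bool.and_eq_true, Bool.or_eq_true,
      Bool.not_eq_eq_eq_not, Bool.not_true, decide_eq_true_eq, decide_eq_false_iff_not]
    tauto
  have h3 : PySem.List.sorted ((PySem.Set.ofList apD.keys).inter (PySem.Set.ofList avD.keys)) (fun x => x) false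
      = S.filter (fun t => apD.contains t && avD.contains t) := by
    apply sorted_sub_eq_filter _ (PySem.Set.nodup_inter _ _ (PySem.Set.nodup_ofList _)) hallnodup
    intro t
    rw [hmemU t]
    simp only [PySem.Set.mem_inter, PySem.Set.mem_ofList, PySem.Dict.contains_eq_decide_mem_keys,
      Bool.and_eq_true, decide_eq_true_eq]
    tauto
  rw [h1, h2, h3]
  have e1 : (S.filter (fun t => apD.contains t && !avD.contains t)).map pvMissingItem
      = (S.filter (fun t => apD.contains t && !avD.contains t)).flatMap (pvH apD pvD obD avD) := by
    refine (flatMap_eq_map_of _ _ _ ?_).symm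
    intro x hx
    have := (List.mem_filter.mp hx).2
    simp only [pvH, this, if_true]
  have e2 : (S.filter (fun t => !apD.contains t && (pvD.contains t || obD.contains t))).map pvUnexpectedItem
      = (S.filter (fun t => !apD.contains t && (pvD.contains t || obD.contains t))).flatMap (pvH apD pvD obD avD) := by
    refine (flatMap_eq_map_of _ _ _ ?_).symm
    intro x hx
    have hx2 := (List.mem_filter.mp hx).2
    have hnap : apD.contains x = false := by
      cases h : apD.contains x
      · rfl
      · rw [h] at hx2; simp at hx2
    rw [hnap] at hx2
    simp only [Bool.not_false, Bool.true_and] at hx2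
    simp [pvH, hnap, hx2]
  have e3 : (S.filter (fun t => apD.contains t && avD.contains t)).flatMap (pvGA apD avD)
      = (S.filter (fun t => apD.contains t && avD.contains t)).flatMap (pvH apD pvD obD avD) := by
    apply flatMap_congr_mem
    intro x hx
    have hx2 := (List.mem_filter.mp hx).2
    rw [Bool.and_eq_true] at hx2
    simp only [pvGA, pvH, hx2.1, hx2.2, Bool.not_true, Bool.and_false, Bool.false_and,
      Bool.false_eq_true, if_false, if_true]
    by_cases hs : pvStructOf apD x = ""
    · simp [hs]
    · simp [hs]
  rw [e1, e2, e3]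
  simp only [pvSortDriftItems]
  apply sorted_eq_of_perm_of_key_nodup
  · refine (flatMap_partition3 _ _ _ (pvH apD pvD obD avD) S ?_ ?_ ?_ ?_).symm
    · intro x hx
      cases hap : apD.contains x <;> simp_all
    · intro x hx
      cases hap : apD.contains x <;> cases hav : avD.contains x <;> simp_all
    · intro x hx
      cases hap : apD.contains x <;> simp_all
    · intro x hx1 hx2 hx3
      cases hap : apD.contains x <;> cases hav : avD.contains x <;> simp_all [pvH]
  · apply nodup_key_of_nodup_tgt
    apply nodup_map_flatMap _ _ _ hSnodup
    · intro x it hit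
      simp only [pvH] at hit
      split_ifs at hit <;>
        simp_all [pvMissingItem, pvUnexpectedItem, pvMismatchItem, pvItemGet_driftItem_target]
    · intro x
      simp only [pvH]
      split_ifs <;> simp

theorem build_drift_items_py_spec : Claim_equal_build_drift_items_py := by
  intro ap pv ob av _ _
  exact pvAB_eq ap pv ob av
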